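-- pv_equiv track=rewrite | github.com/Integer-Conversion-Error/CSI3120A1 | A1.py | matchParantheses
-- ===== SOURCE A (Python) =====
-- def matchParantheses(tokens):
--     """
--     Finds the indices of matching parentheses in a list of tokens.
--     :param tokens: A list of tokens.
--     :return: A tuple with the indices of the first matching parentheses, or (-1, -1) if not found.
--     """
--     first_index = -1
--     for i, token in enumerate(tokens):
--         if token == '(':
--             first_index = i
--             break
--
--     if first_index == -1:
--         return -1, -1
--
--     open_count = 0
--     for index in range(first_index, len(tokens)):
--         token = tokens[index]
--         if token == '(':
--             open_count += 1
--         elif token == ')':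
--             open_count -= 1
--         if open_count == 0:
--             return first_index, index
--
--     return -1, -1
-- ===== SOURCE B (Python) =====
-- def matchParantheses(tokens):
--     stack = []
--     for i, token in enumerate(tokens):
--         if token == '(':
--             stack.append(i)
--         elif token == ')':
--             if stack:
--                 j = stack.pop()
--                 if not stack:
--                     return j, i
--     return -1, -1
-- ===== Notes on version B (the rewrite author's own statement) =====
-- stated objective: idiomatic
-- what changed: Replaced A's two-phase scheme (a first scan to locate the first '(', then a second indexed range loop with an integer counter) by a single enumerate pass maintaining a stack of indices of unmatched '(', returning when the stack empties.
import Mathlib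
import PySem

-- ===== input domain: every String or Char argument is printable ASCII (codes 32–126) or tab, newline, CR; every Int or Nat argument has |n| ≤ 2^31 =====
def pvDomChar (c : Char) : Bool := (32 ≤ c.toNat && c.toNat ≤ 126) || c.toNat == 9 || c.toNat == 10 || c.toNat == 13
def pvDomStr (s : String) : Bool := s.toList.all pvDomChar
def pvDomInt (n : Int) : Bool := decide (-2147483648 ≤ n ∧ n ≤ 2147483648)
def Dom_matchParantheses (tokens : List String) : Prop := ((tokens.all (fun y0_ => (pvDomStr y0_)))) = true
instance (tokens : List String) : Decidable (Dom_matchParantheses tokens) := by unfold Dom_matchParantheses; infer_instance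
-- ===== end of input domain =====

-- B replaces A's two scans (find first '(', then an indexed counter loop) by one
-- enumerate pass with a stack of indices of unmatched '(' (objective: idiomatic).

-- ===== PORT A =====
-- first loop: 'for i, token in enumerate(tokens): if token == '(': first_index = i; break'
def pvAFind : List String → Int → Int
  | [], _ => -1
  | t :: ts, i => if t = "(" then i else pvAFind ts (i + 1)

-- second loop: 'for index in range(first_index, len(tokens)): token = tokens[index]; …'
-- (tokens[index] via PySem.List.pyGet?; '.getD ""' only totalizes — every index of the
-- range is in bounds, so the default is never the value used)
def pvALoop (tokens : List String) : List Int → Int → Int → Int × Int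
  | [], _, _ => (-1, -1)
  | idx :: rest, openCount, f =>
    let token := (PySem.List.pyGet? tokens idx).getD ""
    let oc := if token = "(" then openCount + 1
              else if token = ")" then openCount - 1 else openCount
    if oc = 0 then (f, idx) else pvALoop tokens rest oc f

def matchParantheses (tokens : List String) : Int × Int :=
  let f := pvAFind tokens 0
  if f = -1 then (-1, -1)
  else pvALoop tokens (PySem.List.pyRange f (tokens.length : Int) 1) 0 f

-- ===== PORT B =====
-- single pass; 'stack' holds indices of unmatched '(' (head = top, python list end)
def pvBLoop : List String → Int → List Int → Int × Int
  | [], _, _ => (-1, -1)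
  | t :: ts, i, stack =>
    if t = "(" then pvBLoop ts (i + 1) (i :: stack)
    else if t = ")" then
      match stack with
      | [] => pvBLoop ts (i + 1) []
      | j :: rest => if rest = [] then (j, i) else pvBLoop ts (i + 1) rest
    else pvBLoop ts (i + 1) stack

def matchParantheses_alt (tokens : List String) : Int × Int :=
  pvBLoop tokens 0 []

-- ===== PRECONDITION & SPEC =====
def Spec_matchParantheses (tokens : List String) (out : Int × Int) : Prop := out = matchParantheses_alt tokens
instance (tokens : List String) (out : Int × Int) : Decidable (Spec_matchParantheses tokens out) := by unfold Spec_matchParantheses; infer_instance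

-- ===== CLAIM (what is proved, stated in full; the proofs are below) =====
def Claim_equal_matchParantheses : Prop := ∀ (tokens : List String), Dom_matchParantheses tokens → Spec_matchParantheses tokens (matchParantheses tokens)

-- ===== LEMMAS AND PROOFS =====

-- A's second loop rewritten as structural recursion on the suffix (proof helper)
def pvALoopS : List String → Int → Int → Int → Int × Int
  | [], _, _, _ => (-1, -1)
  | t :: ts, i, oc, f =>
    let oc' := if t = "(" then oc + 1 else if t = ")" then oc - 1 else oc
    if oc' = 0 then (f, i) else pvALoopS ts (i + 1) oc' f

theorem pvALoop_eq_S (tokens : List String) :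
    ∀ (n k : Nat), tokens.length - k = n → ∀ (oc f : Int),
      pvALoop tokens (PySem.List.pyRange (k : Int) (tokens.length : Int) 1) oc f
        = pvALoopS (tokens.drop k) (k : Int) oc f := by
  intro n
  induction n with
  | zero =>
    intro k hk oc f
    have hkl : tokens.length ≤ k := by omega
    rw [PySem.List.pyRange_one_eq_nil (by exact_mod_cast hkl),
        List.drop_eq_nil_of_le hkl]
    rfl
  | succ n ih =>
    intro k hk oc f
    have hlt : k < tokens.length := by omega
    rw [PySem.List.pyRange_one_cons (by exact_mod_cast hlt)]
    have hget : PySem.List.pyGet? tokens (k : Int) = some tokens[k] := by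
      rw [PySem.List.pyGet?_natCast, List.getElem?_eq_getElem hlt]
    have hdrop : tokens.drop k = tokens[k] :: tokens.drop (k + 1) :=
      List.drop_eq_getElem_cons hlt
    have hcast : (k : Int) + 1 = ((k + 1 : Nat) : Int) := by push_cast; ring
    rw [hdrop]
    show (let token := (PySem.List.pyGet? tokens (k : Int)).getD ""
          let oc' := if token = "(" then oc + 1
                     else if token = ")" then oc - 1 else oc
          if oc' = 0 then (f, (k : Int))
          else pvALoop tokens (PySem.List.pyRange ((k : Int) + 1) (tokens.length : Int) 1) oc' f)
        = _
    rw [hget]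
    simp only [Option.getD_some, pvALoopS]
    split_ifs with h1 h2 h3 h4 h5 <;> try rfl
    · rw [hcast]; exact ih (k + 1) (by omega) _ f
    · rw [hcast]; exact ih (k + 1) (by omega) _ f
    · rw [hcast]; exact ih (k + 1) (by omega) _ f

theorem pvBLoop_eq_S : ∀ (l : List String) (i : Int) (pre : List Int) (f : Int),
    pvBLoop l i (pre ++ [f]) = pvALoopS l i ((pre ++ [f]).length : Int) f := by
  intro l
  induction l with
  | nil => intro i pre f; rfl
  | cons t ts ih =>
    intro i pre f
    by_cases h1 : t = "("
    · have e1 : pvBLoop (t :: ts) i (pre ++ [f]) = pvBLoop ts (i + 1) ((i :: pre) ++ [f]) := by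
        simp [pvBLoop, h1]
      have e2 : pvALoopS (t :: ts) i ((pre ++ [f]).length : Int) f
          = pvALoopS ts (i + 1) (((pre ++ [f]).length : Int) + 1) f := by
        simp only [pvALoopS, if_pos h1]
        rw [if_neg (by omega)]
      rw [e1, e2, ih]
      congr 1
    · by_cases h2 : t = ")"
      · cases pre with
        | nil => simp [pvBLoop, pvALoopS, h2]
        | cons p ps =>
          have e1 : pvBLoop (t :: ts) i ((p :: ps) ++ [f]) = pvBLoop ts (i + 1) (ps ++ [f]) := by
            simp [pvBLoop, h2]
          have e2 : pvALoopS (t :: ts) i (((p :: ps) ++ [f]).length : Int) f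
              = pvALoopS ts (i + 1) ((((p :: ps) ++ [f]).length : Int) - 1) f := by
            simp only [pvALoopS, if_neg h1, if_pos h2]
            rw [if_neg (by simp; omega)]
          rw [e1, e2, ih]
          congr 1
          simp
      · have e1 : pvBLoop (t :: ts) i (pre ++ [f]) = pvBLoop ts (i + 1) (pre ++ [f]) := by
          simp [pvBLoop, h1, h2]
        have e2 : pvALoopS (t :: ts) i ((pre ++ [f]).length : Int) f
            = pvALoopS ts (i + 1) ((pre ++ [f]).length : Int) f := by
          simp only [pvALoopS, if_neg h1, if_neg h2]
          rw [if_neg (by simp only [List.length_append, List.length_cons, List.length_nil]; omega)]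
        rw [e1, e2, ih]

theorem pvAFind_ge : ∀ (l : List String) (i : Int),
    pvAFind l i = -1 ∨ i ≤ pvAFind l i := by
  intro l
  induction l with
  | nil => intro i; left; rfl
  | cons t ts ih =>
    intro i
    by_cases h : t = "("
    · right; simp [pvAFind, h]
    · rcases ih (i + 1) with h' | h'
      · left; simpa [pvAFind, h] using h'
      · right
        have : pvAFind (t :: ts) i = pvAFind ts (i + 1) := by simp [pvAFind, h]
        omega

theorem pvBLoop_phase1 : ∀ (l : List String) (i : Int), 0 ≤ i →
    pvBLoop l i [] =
      (if pvAFind l i = -1 then ((-1 : Int), (-1 : Int))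
       else pvALoopS (l.drop (pvAFind l i - i).toNat) (pvAFind l i) 0 (pvAFind l i)) := by
  intro l
  induction l with
  | nil => intro i _; rfl
  | cons t ts ih =>
    intro i hi
    by_cases h1 : t = "("
    · have hf : pvAFind (t :: ts) i = i := by simp [pvAFind, h1]
      have hne : i ≠ -1 := by omega
      rw [hf]
      simp only [hne, if_false]
      have hd : ((t :: ts).drop (i - i).toNat) = t :: ts := by
        simp
      rw [hd]
      have hstep : pvALoopS (t :: ts) i 0 i = pvALoopS ts (i + 1) 1 i := by
        simp [pvALoopS, h1]
      rw [hstep]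
      have hb : pvBLoop (t :: ts) i [] = pvBLoop ts (i + 1) ([] ++ [i]) := by
        simp [pvBLoop, h1]
      rw [hb, pvBLoop_eq_S ts (i + 1) [] i]
      rfl
    · have hf : pvAFind (t :: ts) i = pvAFind ts (i + 1) := by simp [pvAFind, h1]
      have hb : pvBLoop (t :: ts) i [] = pvBLoop ts (i + 1) [] := by
        by_cases h2 : t = ")" <;> simp [pvBLoop, h1, h2]
      rw [hf, hb, ih (i + 1) (by omega)]
      by_cases hnil : pvAFind ts (i + 1) = -1
      · simp [hnil]
      · have hge : i + 1 ≤ pvAFind ts (i + 1) := by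
          rcases pvAFind_ge ts (i + 1) with h | h
          · exact absurd h hnil
          · exact h
        simp only [hnil, if_false]
        congr 1
        have : (pvAFind ts (i + 1) - i).toNat = (pvAFind ts (i + 1) - (i + 1)).toNat + 1 := by
          omega
        rw [this, List.drop_succ_cons]

-- ===== VERDICT (by name: the statement is the Claim_ definition above) =====
theorem matchParantheses_spec : Claim_equal_matchParantheses := by
  unfold Claim_equal_matchParantheses
  intro tokens _
  unfold Spec_matchParantheses matchParantheses matchParantheses_alt
  rw [pvBLoop_phase1 tokens 0 le_rfl]
  by_cases hnil : pvAFind tokens 0 = -1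
  · simp [hnil]
  · have hge : (0 : Int) ≤ pvAFind tokens 0 := by
      rcases pvAFind_ge tokens 0 with h | h
      · exact absurd h hnil
      · exact h
    simp only [hnil, if_false]
    have hk : ((pvAFind tokens 0).toNat : Int) = pvAFind tokens 0 := by omega
    rw [← hk, pvALoop_eq_S tokens (tokens.length - (pvAFind tokens 0).toNat) _ rfl]
    congr 1
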